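-- pv_equiv track=rewrite | github.com/hexzeus/awesome-tool | core/generator.py | _parse_variants
-- ===== SOURCE A (Python) =====
-- from typing import Dict, Optional, List, Literal
--
-- def _parse_variants(variants_text: str) -> List[str]:
--     """Parse subject line variants (legacy method)"""
--     variants = []
--     for line in variants_text.split("\n"):
--         if line.startswith("VARIANT_"):
--             variant = line.split(":", 1)[1].strip() if ":" in line else ""
--             if variant:
--                 variants.append(variant)
--     return variants
-- ===== SOURCE B (Python) =====
-- def _parse_variants(variants_text):
--     """Parse subject line variants (single index-based scan, no line list built)"""
--     variants = []
--     n = len(variants_text)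
--     pos = 0
--     while True:
--         nl = variants_text.find("\n", pos)
--         end = n if nl == -1 else nl
--         if variants_text.startswith("VARIANT_", pos):
--             c = variants_text.find(":", pos + 8)
--             if c != -1 and c < end:
--                 v = variants_text[c + 1:end].strip()
--                 if v:
--                     variants.append(v)
--         if nl == -1:
--             break
--         pos = nl + 1
--     return variants
-- ===== Notes on version B (the rewrite author's own statement) =====
-- stated objective: alternative
-- what changed: Replaced split-into-a-line-list plus per-line startswith/split(':',1) with a single index-based scan of the original string that locates each newline and the line's first colon with str.find and slices the value out directly, building no intermediate line list.
import Mathlib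
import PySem

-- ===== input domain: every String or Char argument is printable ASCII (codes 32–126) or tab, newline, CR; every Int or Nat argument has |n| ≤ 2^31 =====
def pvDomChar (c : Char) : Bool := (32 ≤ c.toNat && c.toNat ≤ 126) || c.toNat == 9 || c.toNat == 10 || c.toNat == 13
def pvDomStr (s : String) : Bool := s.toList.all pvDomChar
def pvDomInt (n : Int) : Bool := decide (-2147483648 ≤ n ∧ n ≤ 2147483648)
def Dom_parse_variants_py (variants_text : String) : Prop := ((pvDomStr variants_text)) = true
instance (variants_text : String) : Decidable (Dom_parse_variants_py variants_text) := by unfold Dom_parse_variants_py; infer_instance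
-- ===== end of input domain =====

-- B replaces A's split-into-a-line-list + per-line split(":",1) with a single index-based
-- scan of the string (find the newline / the first colon, slice the value out); objective:
-- alternative (same O(n) cost, no intermediate line list).

-- ===== PORT A =====
def parse_variants_py (variants_text : String) : List String :=
  (PySem.Chars.splitOn variants_text.toList ['\n']).foldl
    (fun variants line =>
      if PySem.Chars.startswith line "VARIANT_".toList then
        let variant : List Char :=
          if PySem.Chars.isIn [':'] line then
            -- line.split(":", 1)[1]: the [1] never raises because ':' ∈ line
            match PySem.List.pyGet? (PySem.Chars.splitOnMax line [':'] 1) 1 with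
            | some t => PySem.Chars.strip t
            | none => []
          else []
        if variant ≠ [] then variants ++ [String.ofList variant] else variants
      else variants) []

-- ===== PORT B =====
-- termination fact for the scanner: a found newline lies at or after pos and inside the string
lemma pv_findFrom_bounds (cs sub : List Char) (hsub : sub ≠ []) (pos : Nat)
    (h : PySem.Chars.findFrom cs sub (pos : Int) none ≠ -1) :
    pos ≤ (PySem.Chars.findFrom cs sub (pos : Int) none).toNat ∧
    (PySem.Chars.findFrom cs sub (pos : Int) none).toNat < cs.length := by
  by_cases hp : pos ≤ cs.length
  · obtain ⟨h1, h2, -⟩ := PySem.Chars.findFrom_natCast_spec cs sub pos hp h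
    have hres : 0 ≤ PySem.Chars.findFrom cs sub (pos : Int) none := le_trans (Int.natCast_nonneg pos) h1
    have h1' : pos ≤ (PySem.Chars.findFrom cs sub (pos : Int) none).toNat := by omega
    refine ⟨h1', ?_⟩
    have hne : List.drop (PySem.Chars.findFrom cs sub (pos : Int) none).toNat cs ≠ [] := by
      intro hnil
      rw [hnil] at h2
      exact hsub (List.prefix_nil.mp h2)
    have hd : (PySem.Chars.findFrom cs sub (pos : Int) none).toNat < cs.length := by
      by_contra hge
      exact hne (List.drop_eq_nil_of_le (by omega))
    exact hd
  · exfalso; apply h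
    have hpos : ¬((pos : Int) < 0) := by omega
    have hlt : (cs.length : Int) < (pos : Int) := by exact_mod_cast Nat.lt_of_not_le hp
    simp only [PySem.Chars.findFrom]
    rw [if_neg hpos, if_pos hlt]

-- scanner: pos is the current line start; Python's s.startswith(p, pos) is ported as
-- startswith on cs.drop pos (exact here since 0 ≤ pos); s.find(sub, k) is PySem.Chars.findFrom
def altGo (cs : List Char) (pos : Nat) (variants : List String) : List String :=
  let nl := PySem.Chars.findFrom cs ['\n'] (pos : Int) none
  let endd : Int := if nl = -1 then (cs.length : Int) else nl
  let variants' :=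
    if PySem.Chars.startswith (cs.drop pos) "VARIANT_".toList then
      let c := PySem.Chars.findFrom cs [':'] ((pos : Int) + 8) none
      if c ≠ -1 ∧ c < endd then
        let v := PySem.Chars.strip (PySem.Chars.slice cs (some (c + 1)) (some endd))
        if v ≠ [] then variants ++ [String.ofList v] else variants
      else variants
    else variants
  if h : nl = -1 then variants'
  else altGo cs (nl.toNat + 1) variants'
termination_by cs.length + 1 - pos
decreasing_by
  have := pv_findFrom_bounds cs ['\n'] (by simp) pos h
  omega

def parse_variants_py_alt (variants_text : String) : List String :=
  altGo variants_text.toList 0 []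

-- ===== PRECONDITION & SPEC =====
def Spec_parse_variants_py (variants_text : String) (out : List String) : Prop := out = parse_variants_py_alt variants_text
instance (variants_text : String) (out : List String) : Decidable (Spec_parse_variants_py variants_text out) := by unfold Spec_parse_variants_py; infer_instance

-- ===== CLAIM (what is proved, stated in full; the proofs are below) =====
def Claim_equal_parse_variants_py : Prop := ∀ (variants_text : String), Dom_parse_variants_py variants_text → Spec_parse_variants_py variants_text (parse_variants_py variants_text)


-- ===== LEMMAS AND PROOFS =====

-- the list of lines Python's split("\n") produces, as a structural recursion
def pvLines : List Char → List (List Char)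
  | [] => [[]]
  | c :: rest =>
    if c = '\n' then [] :: pvLines rest
    else match pvLines rest with
      | [] => [[c]]
      | l :: ls => (c :: l) :: ls

-- A's per-line contribution
def pvVal (line : List Char) : List String :=
  if "VARIANT_".toList.isPrefixOf line then
    if line.contains ':' then
      if PySem.Chars.strip ((line.dropWhile (· ≠ ':')).tail) = [] then []
      else [String.ofList (PySem.Chars.strip ((line.dropWhile (· ≠ ':')).tail))]
    else []
  else []

def pvConsFst (p : List Char) : List (List Char) → List (List Char)
  | [] => [p]
  | x :: xs => (p ++ x) :: xs

lemma pvLines_ne_nil (l : List Char) : pvLines l ≠ [] := by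
  induction l with
  | nil => simp [pvLines]
  | cons c rest ih =>
    simp only [pvLines]
    split
    · simp
    · rcases hr : pvLines rest with _ | ⟨x, xs⟩ <;> simp [hr]

lemma splitOn_go_nl (fuel : Nat) : ∀ (l cur : List Char) (acc : List (List Char)), l.length ≤ fuel →
    PySem.Chars.splitOn.go ['\n'] fuel l cur acc = acc.reverse ++ pvConsFst cur.reverse (pvLines l) := by
  induction fuel with
  | zero =>
    intro l cur acc h
    have hl : l = [] := List.eq_nil_of_length_eq_zero (by omega)
    subst hl
    simp [PySem.Chars.splitOn.go, pvLines, pvConsFst]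
  | succ fuel ih =>
    intro l cur acc h
    cases l with
    | nil => simp [PySem.Chars.splitOn.go, pvLines, pvConsFst]
    | cons c rest =>
      by_cases hc : c = '\n'
      · subst hc
        have hpre : (['\n'] : List Char).isPrefixOf ('\n' :: rest) = true := by
          simp [List.isPrefixOf]
        simp only [PySem.Chars.splitOn.go, hpre, if_true, List.length_cons, List.drop_succ_cons,
          List.length_nil, List.drop_zero]
        rw [ih rest [] (cur.reverse :: acc) (by simpa using Nat.le_of_succ_le_succ h)]
        have : pvLines ('\n' :: rest) = [] :: pvLines rest := by simp [pvLines]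
        rw [this]
        rcases hr : pvLines rest with _ | ⟨x, xs⟩
        · exact absurd hr (pvLines_ne_nil rest)
        · simp [pvConsFst]
      · have hpre : (['\n'] : List Char).isPrefixOf (c :: rest) = false := by
          simp [List.isPrefixOf]
          intro hh
          exact absurd hh.symm hc
        simp only [PySem.Chars.splitOn.go, hpre, Bool.false_eq_true, if_false]
        rw [ih rest (c :: cur) acc (by simpa using Nat.le_of_succ_le_succ h)]
        have : pvLines (c :: rest) = pvConsFst [c] (pvLines rest) := by
          simp only [pvLines, hc, if_false]
          rcases hr : pvLines rest with _ | ⟨x, xs⟩ <;> simp [pvConsFst, hr]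
        rw [this]
        rcases hr : pvLines rest with _ | ⟨x, xs⟩
        · exact absurd hr (pvLines_ne_nil rest)
        · simp [pvConsFst]

lemma splitOn_eq_pvLines (l : List Char) : PySem.Chars.splitOn l ['\n'] = pvLines l := by
  unfold PySem.Chars.splitOn
  rw [splitOn_go_nl (l.length + 1) l [] [] (by omega)]
  rcases hr : pvLines l with _ | ⟨x, xs⟩
  · exact absurd hr (pvLines_ne_nil l)
  · simp [pvConsFst]

lemma splitOnMax_go_zero (fuel : Nat) (l cur : List Char) (acc : List (List Char)) (h : l.length ≤ fuel) :
    PySem.Chars.splitOnMax.go [':'] fuel 0 l cur acc = acc.reverse ++ [cur.reverse ++ l] := by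
  cases fuel with
  | zero =>
    have hl : l = [] := List.eq_nil_of_length_eq_zero (by omega)
    subst hl
    simp [PySem.Chars.splitOnMax.go]
  | succ fuel =>
    cases l with
    | nil => simp [PySem.Chars.splitOnMax.go]
    | cons c rest => simp [PySem.Chars.splitOnMax.go]

lemma splitOnMax_go_one (fuel : Nat) : ∀ (l cur : List Char) (acc : List (List Char)), l.length ≤ fuel →
    PySem.Chars.splitOnMax.go [':'] fuel 1 l cur acc = acc.reverse ++
      (if l.contains ':' then [cur.reverse ++ l.takeWhile (· ≠ ':'), (l.dropWhile (· ≠ ':')).tail]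
       else [cur.reverse ++ l]) := by
  induction fuel with
  | zero =>
    intro l cur acc h
    have hl : l = [] := List.eq_nil_of_length_eq_zero (by omega)
    subst hl
    simp [PySem.Chars.splitOnMax.go]
  | succ fuel ih =>
    intro l cur acc h
    cases l with
    | nil => simp [PySem.Chars.splitOnMax.go]
    | cons c rest =>
      by_cases hc : c = ':'
      · subst hc
        have hpre : ([':'] : List Char).isPrefixOf (':' :: rest) = true := by
          simp [List.isPrefixOf]
        simp only [PySem.Chars.splitOnMax.go, hpre, if_true, one_ne_zero, if_false,
          List.length_cons, List.drop_succ_cons, List.length_nil, List.drop_zero, Nat.sub_self]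
        rw [splitOnMax_go_zero fuel rest [] (cur.reverse :: acc)
          (by simpa using Nat.le_of_succ_le_succ h)]
        simp [List.takeWhile, List.dropWhile]
      · have hpre : ([':'] : List Char).isPrefixOf (c :: rest) = false := by
          simp [List.isPrefixOf]
          intro hh
          exact absurd hh.symm hc
        simp only [PySem.Chars.splitOnMax.go, hpre, Bool.false_eq_true, if_false, one_ne_zero]
        rw [ih rest (c :: cur) acc (by simpa using Nat.le_of_succ_le_succ h)]
        have ht : (c :: rest).takeWhile (· ≠ ':') = c :: rest.takeWhile (· ≠ ':') := by
          simp [List.takeWhile, hc]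
        have hd : (c :: rest).dropWhile (· ≠ ':') = rest.dropWhile (· ≠ ':') := by
          simp [List.dropWhile, hc]
        have hcon : (c :: rest).contains ':' = rest.contains ':' := by
          simp [List.contains_cons, hc]
          intro hh
          exact absurd hh.symm hc
        rw [ht, hd, hcon]
        by_cases hr : rest.contains ':' <;> simp [hr]

lemma splitOnMax_colon (l : List Char) : PySem.Chars.splitOnMax l [':'] 1 =
    (if l.contains ':' then [l.takeWhile (· ≠ ':'), (l.dropWhile (· ≠ ':')).tail] else [l]) := by
  unfold PySem.Chars.splitOnMax
  rw [if_neg (by omega)]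
  have h1 : (1 : Int).toNat = 1 := rfl
  rw [h1, splitOnMax_go_one (l.length + 1) l [] [] (by omega)]
  by_cases hr : l.contains ':' <;> simp [hr]

lemma singleton_infix_iff (ch : Char) (l : List Char) : [ch] <:+: l ↔ ch ∈ l := by
  constructor
  · rintro ⟨s, t, h⟩
    rw [← h]
    simp
  · intro h
    obtain ⟨s, t, rfl⟩ := List.append_of_mem h
    exact ⟨s, t, by simp⟩

lemma isIn_singleton (ch : Char) (l : List Char) : PySem.Chars.isIn [ch] l = l.contains ch := by
  by_cases h : ch ∈ l
  · rw [(PySem.Chars.isIn_iff_infix _ _).mpr ((singleton_infix_iff _ _).mpr h)]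
    simp [h]
  · have hfalse : PySem.Chars.isIn [ch] l = false := by
      rw [Bool.eq_false_iff]
      exact fun ht => h ((singleton_infix_iff _ _).mp ((PySem.Chars.isIn_iff_infix _ _).mp ht))
    rw [hfalse]
    simp [h]

lemma foldl_append_pv {α : Type} (g : α → List String) (ls : List α) :
    ∀ init : List String, ls.foldl (fun acc x => acc ++ g x) init = init ++ ls.flatMap g := by
  induction ls with
  | nil => intro init; simp
  | cons x xs ih => intro init; rw [List.foldl_cons, ih]; simp

lemma A_eq (s : String) : parse_variants_py s = (pvLines s.toList).flatMap pvVal := by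
  unfold parse_variants_py
  rw [splitOn_eq_pvLines]
  have hbody : (fun (variants : List String) (line : List Char) =>
      if PySem.Chars.startswith line "VARIANT_".toList then
        let variant : List Char :=
          if PySem.Chars.isIn [':'] line then
            match PySem.List.pyGet? (PySem.Chars.splitOnMax line [':'] 1) 1 with
            | some t => PySem.Chars.strip t
            | none => []
          else []
        if variant ≠ [] then variants ++ [String.ofList variant] else variants
      else variants) = fun acc line => acc ++ pvVal line := by
    funext acc line
    by_cases h1 : "VARIANT_".toList.isPrefixOf line = true
    · have hsw : PySem.Chars.startswith line "VARIANT_".toList = true := by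
        simpa [PySem.Chars.startswith] using h1
      simp only [hsw, if_true, pvVal, h1, isIn_singleton]
      by_cases h2 : line.contains ':' = true
      · simp only [h2, if_true, splitOnMax_colon]
        have hg : PySem.List.pyGet?
            [line.takeWhile (· ≠ ':'), (line.dropWhile (· ≠ ':')).tail] (1 : Int) =
            some ((line.dropWhile (· ≠ ':')).tail) := by
          simp [PySem.List.pyGet?, PySem.List.pyIdx?]
        rw [hg]
        split_ifs with h3 h4 <;> simp_all
      · have h2' : ':' ∉ line := by simpa using h2
        simp [h2']
    · have hsw : PySem.Chars.startswith line "VARIANT_".toList = false := by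
        rw [Bool.eq_false_iff]
        simpa [PySem.Chars.startswith] using h1
      rw [if_neg (by rw [hsw]; simp)]
      unfold pvVal
      rw [if_neg h1]
      simp
  rw [hbody, foldl_append_pv]
  simp

lemma singleton_prefix_drop (l : List Char) (a : Char) (i : Nat) : [a] <+: l.drop i ↔ l[i]? = some a := by
  constructor
  · rintro ⟨t, ht⟩
    have := congrArg List.head? ht
    simpa [List.head?_drop] using this.symm
  · intro h
    refine ⟨(l.drop i).tail, ?_⟩
    have hh : (l.drop i).head? = some a := by simpa [List.head?_drop] using h
    cases hd : l.drop i with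
    | nil => simp [hd] at hh
    | cons x xs => simp [hd] at hh ⊢; simp [hh]

lemma find_singleton_decomp (u v : List Char) (ch : Char) (h : ch ∉ u) :
    PySem.Chars.find (u ++ ch :: v) [ch] = u.length := by
  have hmem : ch ∈ u ++ ch :: v := by simp
  have hnn : 0 ≤ PySem.Chars.find (u ++ ch :: v) [ch] :=
    (PySem.Chars.find_nonneg_iff _ _).mpr ((singleton_infix_iff _ _).mpr hmem)
  obtain ⟨hpre, hmin⟩ := PySem.Chars.find_spec hnn
  set k := (PySem.Chars.find (u ++ ch :: v) [ch]).toNat with hk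
  have hget : (u ++ ch :: v)[u.length]? = some ch := by
    rw [List.getElem?_append_right (le_refl _)]
    simp
  have h1 : ¬ (u.length < k) := fun hlt =>
    hmin u.length hlt ((singleton_prefix_drop _ _ _).mpr hget)
  have h2 : ¬ (k < u.length) := by
    intro hlt
    have hp := (singleton_prefix_drop _ _ _).mp hpre
    rw [List.getElem?_append_left hlt] at hp
    exact h (List.mem_of_getElem? hp)
  have hke : k = u.length := by omega
  omega

lemma find_singleton_none (l : List Char) (ch : Char) (h : ch ∉ l) :
    PySem.Chars.find l [ch] = -1 := by
  rw [PySem.Chars.find_eq_neg_one_iff]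
  exact fun hin => h ((singleton_infix_iff _ _).mp hin)

lemma first_split (l : List Char) (ch : Char) (h : ch ∈ l) :
    ∃ u v, l = u ++ ch :: v ∧ ch ∉ u ∧ u = l.takeWhile (· ≠ ch) ∧ ch :: v = l.dropWhile (· ≠ ch) := by
  induction l with
  | nil => simp at h
  | cons c rest ih =>
    by_cases hc : c = ch
    · subst hc
      exact ⟨[], rest, rfl, by simp, by simp [List.takeWhile], by simp [List.dropWhile]⟩
    · have hm : ch ∈ rest := by
        rcases List.mem_cons.mp h with h1 | h1
        · exact absurd h1.symm hc
        · exact h1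
      obtain ⟨u, v, h1, h2, h3, h4⟩ := ih hm
      refine ⟨c :: u, v, by simp [h1], ?_, ?_, ?_⟩
      · simp only [List.mem_cons, not_or]
        exact ⟨fun hh => hc hh.symm, h2⟩
      · rw [List.takeWhile_cons_of_pos (by simp [hc]), ← h3]
      · rw [List.dropWhile_cons_of_pos (by simp [hc])]
        exact h4

lemma pvLines_no_nl (l : List Char) (h : '\n' ∉ l) : pvLines l = [l] := by
  induction l with
  | nil => simp [pvLines]
  | cons c rest ih =>
    simp only [List.mem_cons, not_or] at h
    have hc : ¬ (c = '\n') := fun hh => h.1 hh.symm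
    simp only [pvLines, hc, if_false]
    rw [ih h.2]

lemma pvLines_break (a b : List Char) (h : '\n' ∉ a) :
    pvLines (a ++ '\n' :: b) = a :: pvLines b := by
  induction a with
  | nil => simp [pvLines]
  | cons c a' ih =>
    simp only [List.mem_cons, not_or] at h
    have hc : ¬ (c = '\n') := fun hh => h.1 hh.symm
    simp only [List.cons_append, pvLines, hc, if_false]
    rw [ih h.2]

lemma takeWhile_append_of_all (p : Char → Bool) (l r : List Char) (h : ∀ x ∈ l, p x) :
    (l ++ r).takeWhile p = l ++ r.takeWhile p := by
  induction l with
  | nil => simp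
  | cons c l' ih =>
    rw [List.cons_append, List.takeWhile_cons_of_pos (h c (by simp)),
      ih (fun x hx => h x (by simp [hx]))]
    rfl

lemma dropWhile_append_of_all (p : Char → Bool) (l r : List Char) (h : ∀ x ∈ l, p x) :
    (l ++ r).dropWhile p = r.dropWhile p := by
  induction l with
  | nil => simp
  | cons c l' ih =>
    rw [List.cons_append, List.dropWhile_cons_of_pos (h c (by simp)),
      ih (fun x hx => h x (by simp [hx]))]

set_option maxRecDepth 4096 in
lemma pvBody_eq (cs : List Char) (pos : Nat) (endd : Int) (out : List String)
    (a tail : List Char)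
    (hdecomp : cs.drop pos = a ++ tail)
    (hna : '\n' ∉ a)
    (hcase : (tail = [] ∧ endd = (cs.length : Int)) ∨
             (∃ b, tail = '\n' :: b ∧ endd = (pos : Int) + a.length)) :
    (if PySem.Chars.startswith (cs.drop pos) "VARIANT_".toList then
      if PySem.Chars.findFrom cs [':'] ((pos : Int) + 8) none ≠ -1 ∧
         PySem.Chars.findFrom cs [':'] ((pos : Int) + 8) none < endd then
        if PySem.Chars.strip (PySem.Chars.slice cs
              (some (PySem.Chars.findFrom cs [':'] ((pos : Int) + 8) none + 1)) (some endd)) ≠ [] then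
          out ++ [String.ofList (PySem.Chars.strip (PySem.Chars.slice cs
              (some (PySem.Chars.findFrom cs [':'] ((pos : Int) + 8) none + 1)) (some endd)))]
        else out
      else out
    else out) = out ++ pvVal a := by
  by_cases hsw : PySem.Chars.startswith (cs.drop pos) "VARIANT_".toList = true
  case neg =>
    rw [if_neg hsw]
    have hswa : "VARIANT_".toList.isPrefixOf a = false := by
      rw [Bool.eq_false_iff]
      intro hpa
      apply hsw
      have hp : "VARIANT_".toList <+: cs.drop pos := by
        rw [hdecomp]
        exact (List.isPrefixOf_iff_prefix.mp hpa).trans (List.prefix_append a tail)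
      simpa [PySem.Chars.startswith] using List.isPrefixOf_iff_prefix.mpr hp
    have hz : pvVal a = [] := by
      unfold pvVal
      rw [hswa]
      simp
    rw [hz]
    simp
  case pos =>
    rw [if_pos hsw]
    have hpre : "VARIANT_".toList <+: cs.drop pos := by
      rw [← List.isPrefixOf_iff_prefix]
      simpa [PySem.Chars.startswith] using hsw
    have hnlpat : '\n' ∉ "VARIANT_".toList := by decide
    have hcolpat : ':' ∉ "VARIANT_".toList := by decide
    have hpatlen : ("VARIANT_".toList).length = 8 := by decide
    have hpa : "VARIANT_".toList <+: a := by
      rcases hcase with ⟨htail, -⟩ | ⟨b, htail, -⟩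
      · rw [htail, List.append_nil] at hdecomp
        rw [← hdecomp]; exact hpre
      · subst htail
        obtain ⟨t, ht⟩ := hpre
        by_cases hlen : 8 ≤ a.length
        · have h1 : "VARIANT_".toList = (cs.drop pos).take 8 := by
            rw [← ht, ← hpatlen, List.take_left]
          have h2 : (cs.drop pos).take 8 = a.take 8 := by
            rw [hdecomp, List.take_append_of_le_length hlen]
          rw [h1, h2]
          exact List.take_prefix 8 a
        · exfalso
          push_neg at hlen
          have h2 : (cs.drop pos)[a.length]? = some '\n' := by
            rw [hdecomp, List.getElem?_append_right (le_refl _)]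
            simp
          rw [← ht, List.getElem?_append_left (by omega)] at h2
          exact hnlpat (List.mem_of_getElem? h2)
    obtain ⟨a', rfl⟩ := hpa
    have hl2 := congrArg List.length hdecomp
    simp only [List.length_drop, List.length_append, hpatlen] at hl2
    have hpos8 : pos + 8 ≤ cs.length := by
      have hne : cs.drop pos ≠ [] := by rw [hdecomp]; simp
      have hlt : pos < cs.length := by
        by_contra hge
        exact hne (List.drop_eq_nil_of_le (by omega))
      omega
    have hdrop8 : cs.drop (pos + 8) = a' ++ tail := by
      have h1 : cs.drop (pos + 8) = (cs.drop pos).drop 8 := by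
        rw [List.drop_drop]
      rw [h1, hdecomp, List.append_assoc, List.drop_left' hpatlen]
    have hcast : ((pos : Int) + 8) = ((pos + 8 : Nat) : Int) := by push_cast; ring
    rw [hcast, PySem.Chars.findFrom_natCast cs [':'] (pos + 8) hpos8, hdrop8]
    by_cases hc : ':' ∈ a'
    · obtain ⟨u, v', ha', hcu, -, -⟩ := first_split a' ':' hc
      subst ha'
      have hfind : PySem.Chars.find ((u ++ ':' :: v') ++ tail) [':'] = u.length := by
        rw [show (u ++ ':' :: v') ++ tail = u ++ ':' :: (v' ++ tail) from by simp]
        exact find_singleton_decomp u (v' ++ tail) ':' hcu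
      have hFF : (if ((u.length : Int)) = -1 then (-1 : Int) else ((pos + 8 : Nat) : Int) + (u.length : Int)) = ((pos + 8 : Nat) : Int) + (u.length : Int) := if_neg (by omega)
      rw [hfind, hFF]
      have hEn : endd = ((pos + 8 + u.length + 1 + v'.length : Nat) : Int) := by
        rcases hcase with ⟨htail, hE⟩ | ⟨b, htail, hE⟩
        · subst htail
          rw [hE]
          simp only [List.length_nil, List.length_append, List.length_cons] at hl2
          push_cast
          omega
        · rw [hE]
          simp only [List.length_append, List.length_cons, hpatlen]
          push_cast
          omega
      have hcond : ¬(((pos + 8 : Nat) : Int) + (u.length : Int) = -1) ∧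
          ((pos + 8 : Nat) : Int) + (u.length : Int) < endd := by
        refine ⟨by omega, ?_⟩
        rw [hEn]; push_cast; omega
      rw [if_pos hcond]
      have hc1 : ((pos + 8 : Nat) : Int) + (u.length : Int) + 1 =
          ((pos + 8 + u.length + 1 : Nat) : Int) := by push_cast; ring
      have hsl : PySem.Chars.slice cs (some (((pos + 8 : Nat) : Int) + (u.length : Int) + 1))
          (some endd) = v' := by
        rw [hc1, hEn, PySem.Chars.slice_eq_listSlice, PySem.List.slice_natCast]
        have hd : cs.drop (pos + 8 + u.length + 1) = v' ++ tail := by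
          have h1 : cs.drop (pos + 8 + u.length + 1) = (cs.drop (pos + 8)).drop (u.length + 1) := by
            rw [List.drop_drop]
            congr 1 <;> omega
          rw [h1, hdrop8, show (u ++ ':' :: v') ++ tail = (u ++ [':']) ++ (v' ++ tail) from by simp,
            List.drop_left' (by simp)]
        rw [hd, show pos + 8 + u.length + 1 + v'.length - (pos + 8 + u.length + 1) = v'.length from by
          omega, List.take_left' rfl]
      rw [hsl]
      have hpv : pvVal ("VARIANT_".toList ++ (u ++ ':' :: v')) =
          (if PySem.Chars.strip v' = [] then [] else [String.ofList (PySem.Chars.strip v')]) := by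
        have h1 : "VARIANT_".toList.isPrefixOf ("VARIANT_".toList ++ (u ++ ':' :: v')) = true := by
          rw [List.isPrefixOf_iff_prefix]
          exact ⟨_, rfl⟩
        have h2 : ("VARIANT_".toList ++ (u ++ ':' :: v')).contains ':' = true := by
          have hm : ':' ∈ "VARIANT_".toList ++ (u ++ ':' :: v') :=
            List.mem_append.mpr (Or.inr (List.mem_append.mpr (Or.inr List.mem_cons_self)))
          simpa using hm
        have h3 : (("VARIANT_".toList ++ (u ++ ':' :: v')).dropWhile (· ≠ ':')).tail = v' := by
          rw [show ("VARIANT_".toList) = ['V', 'A', 'R', 'I', 'A', 'N', 'T', '_'] from rfl]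
          rw [show ((['V', 'A', 'R', 'I', 'A', 'N', 'T', '_'] : List Char) ++
              (u ++ ':' :: v')).dropWhile (· ≠ ':') = (u ++ ':' :: v').dropWhile (· ≠ ':') from by
            simp [List.dropWhile]]
          rw [dropWhile_append_of_all _ _ _ (fun x hx => by
              simp only [decide_eq_true_eq]
              exact fun he => hcu (he ▸ hx)),
            List.dropWhile_cons_of_neg (by simp)]
          rfl
        unfold pvVal
        rw [h1, h2, h3]
        simp
      rw [hpv]
      by_cases h3 : PySem.Chars.strip v' = [] <;> simp [h3]
    · have hpv : pvVal ("VARIANT_".toList ++ a') = [] := by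
        unfold pvVal
        rw [if_pos (List.isPrefixOf_iff_prefix.mpr ⟨a', rfl⟩)]
        have hcf : ("VARIANT_".toList ++ a').contains ':' = false := by
          rw [Bool.eq_false_iff]
          intro hct
          have hm : ':' ∈ "VARIANT_".toList ++ a' := by simpa using hct
          rcases List.mem_append.mp hm with hm1 | hm1
          · exact hcolpat hm1
          · exact hc hm1
        rw [hcf]
        simp
      rw [hpv, List.append_nil]
      by_cases hct : ':' ∈ a' ++ tail
      · obtain ⟨u, v', huv, hcu, htw, -⟩ := first_split (a' ++ tail) ':' hct
        have hFF : (if ((u.length : Int)) = -1 then (-1 : Int) else ((pos + 8 : Nat) : Int) + (u.length : Int)) = ((pos + 8 : Nat) : Int) + (u.length : Int) := if_neg (by omega)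
        rw [huv, find_singleton_decomp u v' ':' hcu, hFF]
        have hu : a'.length ≤ u.length := by
          rw [htw, takeWhile_append_of_all _ a' tail (fun x hx => by
            simp only [decide_eq_true_eq]
            exact fun he => hc (he ▸ hx))]
          simp
        rcases hcase with ⟨htail, hE⟩ | ⟨b, htail, hE⟩
        · subst htail
          rw [List.append_nil] at hct
          exact absurd hct hc
        · rw [if_neg ?_]
          rintro ⟨-, hlt⟩
          rw [hE] at hlt
          simp only [List.length_append, hpatlen] at hlt
          push_cast at hlt
          omega
      · rw [find_singleton_none _ ':' hct, if_pos rfl, if_neg (by simp)]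

lemma altGo_last (cs : List Char) (pos : Nat) (out : List String)
    (hpos : pos ≤ cs.length) (hmem : '\n' ∉ cs.drop pos) :
    altGo cs pos out = out ++ (pvLines (cs.drop pos)).flatMap pvVal := by
  rw [altGo]
  have hnl : PySem.Chars.findFrom cs ['\n'] (pos : Int) none = -1 := by
    rw [PySem.Chars.findFrom_natCast cs ['\n'] pos hpos,
      find_singleton_none _ _ hmem, if_pos rfl]
  simp only [hnl, reduceIte]
  simp only [dite_true]
  rw [pvBody_eq cs pos ((cs.length : Nat) : Int) out (cs.drop pos) [] (by simp) hmem
    (Or.inl ⟨rfl, rfl⟩)]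
  rw [pvLines_no_nl _ hmem]
  simp

lemma altGo_eq (cs : List Char) (n : Nat) : ∀ (pos : Nat) (out : List String),
    cs.length - pos ≤ n → pos ≤ cs.length →
    altGo cs pos out = out ++ (pvLines (cs.drop pos)).flatMap pvVal := by
  induction n with
  | zero =>
    intro pos out hn hpos
    have hpe : pos = cs.length := by omega
    exact altGo_last cs pos out hpos (by rw [hpe]; simp)
  | succ n ih =>
    intro pos out hn hpos
    by_cases hmem : '\n' ∈ cs.drop pos
    · obtain ⟨u, v, hsplit, hu, -, -⟩ := first_split _ '\n' hmem
      rw [altGo]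
      have hnl : PySem.Chars.findFrom cs ['\n'] (pos : Int) none = ((pos + u.length : Nat) : Int) := by
        rw [PySem.Chars.findFrom_natCast cs ['\n'] pos hpos, hsplit,
          find_singleton_decomp u v '\n' hu, if_neg (by omega)]
        push_cast; ring
      simp only [hnl]
      rw [dif_neg (by omega)]
      have htn : ((pos + u.length : Nat) : Int).toNat = pos + u.length := by omega
      rw [htn]
      rw [if_neg (show ¬(((pos + u.length : Nat) : Int) = -1) by omega)]
      rw [pvBody_eq cs pos ((pos + u.length : Nat) : Int) out u ('\n' :: v) hsplit hu
        (Or.inr ⟨v, rfl, by push_cast; ring⟩)]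
      have hlen1 := congrArg List.length hsplit
      simp only [List.length_drop, List.length_append, List.length_cons] at hlen1
      have hposlt : pos < cs.length := by
        have hne : cs.drop pos ≠ [] := by rw [hsplit]; simp
        by_contra hge
        exact hne (List.drop_eq_nil_of_le (by omega))
      rw [ih (pos + u.length + 1) (out ++ pvVal u) (by omega) (by omega)]
      have hdropv : cs.drop (pos + u.length + 1) = v := by
        have h1 : cs.drop (pos + u.length + 1) = (cs.drop pos).drop (u.length + 1) := by
          rw [List.drop_drop]
          congr 1 <;> omega
        rw [h1, hsplit, show u ++ '\n' :: v = (u ++ ['\n']) ++ v from by simp,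
          List.drop_left' (by simp)]
      rw [hdropv, hsplit, pvLines_break u v hu]
      simp
    · exact altGo_last cs pos out hpos hmem


-- ===== VERDICT (by name: the statement is the Claim_ definition above) =====
theorem parse_variants_py_spec : Claim_equal_parse_variants_py := by
  intro s _
  unfold Spec_parse_variants_py parse_variants_py_alt
  rw [A_eq, altGo_eq s.toList s.toList.length 0 [] (by omega) (by omega)]
  simp
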